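-- pv_equiv track=rewrite | github.com/Austinedo/CS_313E | cs313e_exam_3/Adjacency.py | edge_to_adjacency
-- ===== SOURCE A (Python) =====
-- def edge_to_adjacency(edge_list):
--     nodes = set()
--     for edge in edge_list:
--         nodes.add(edge[0])
--         nodes.add(edge[1])
--
--     sorted_nodes = sorted(nodes)
--     node_to_index = {node: i for i, node in enumerate(sorted_nodes)}
--     num_nodes = len(node_to_index)
--
--     matrix = [[0] * num_nodes for _ in range(num_nodes)]
--
--     for edge in edge_list:
--         start_node_index = node_to_index[edge[0]]
--         end_node_index = node_to_index[edge[1]]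
--         weight = edge[2]
--
--         matrix[start_node_index][end_node_index] = weight
--
--     return matrix
-- ===== SOURCE B (Python) =====
-- def edge_to_adjacency(edge_list):
--     weight = {}
--     for u, v, w in edge_list:
--         weight[(u, v)] = w
--     nodes = sorted({n for e in edge_list for n in e[:2]})
--     return [[weight.get((u, v), 0) for v in nodes] for u in nodes]
-- ===== Notes on version B (the rewrite author's own statement) =====
-- stated objective: idiomatic
-- what changed: A scatters each edge weight into a preallocated zero matrix via a node-to-index dict; B builds a (u,v)->weight table in one pass and then gathers the matrix densely with a nested comprehension over the sorted nodes, with no index arithmetic or in-place mutation.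
import Mathlib
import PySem

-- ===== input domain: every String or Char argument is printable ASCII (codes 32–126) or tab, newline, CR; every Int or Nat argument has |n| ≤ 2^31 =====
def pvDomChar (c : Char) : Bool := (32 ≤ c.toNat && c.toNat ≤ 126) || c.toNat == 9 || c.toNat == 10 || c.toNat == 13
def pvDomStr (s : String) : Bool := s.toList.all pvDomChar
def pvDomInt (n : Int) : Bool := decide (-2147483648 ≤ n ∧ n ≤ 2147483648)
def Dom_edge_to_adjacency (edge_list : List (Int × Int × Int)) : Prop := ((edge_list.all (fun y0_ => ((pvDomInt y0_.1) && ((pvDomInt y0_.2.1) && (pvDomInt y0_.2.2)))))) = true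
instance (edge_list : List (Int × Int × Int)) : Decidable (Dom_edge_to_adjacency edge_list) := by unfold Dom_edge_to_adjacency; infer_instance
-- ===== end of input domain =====

-- B replaces A's per-edge scatter into a preallocated zero matrix by a (u,v)→weight
-- table built in one pass and a dense nested gather over the sorted nodes (objective: idiomatic).

-- ===== PORT A =====
def edge_to_adjacency (edge_list : List (Int × Int × Int)) : List (List Int) :=
  let nodes : PySem.Set Int :=
    edge_list.foldl (fun s e => PySem.Set.add (PySem.Set.add s e.1) e.2.1) PySem.Set.empty
  let sorted_nodes := PySem.List.sorted nodes (fun x => x) false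
  let node_to_index : PySem.Dict Int Int :=
    (PySem.List.enumerate sorted_nodes 0).foldl (fun d p => d.insert p.2 p.1) PySem.Dict.empty
  let num_nodes : Int := node_to_index.size
  let matrix : List (List Int) :=
    (PySem.List.pyRange 0 num_nodes 1).map (fun _ => PySem.List.pyRepeat [(0 : Int)] num_nodes)
  edge_list.foldl (fun m e =>
    -- both lookups always succeed (every endpoint was inserted above), so getD's default is unreachable
    let i := node_to_index.getD e.1 0
    let j := node_to_index.getD e.2.1 0
    PySem.List.pySetD m i (PySem.List.pySetD (PySem.List.pyGetD m i []) j e.2.2)) matrix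

-- ===== PORT B =====
def edge_to_adjacency_alt (edge_list : List (Int × Int × Int)) : List (List Int) :=
  let weight : PySem.Dict (Int × Int) Int :=
    edge_list.foldl (fun d e => d.insert (e.1, e.2.1) e.2.2) PySem.Dict.empty
  let nodes :=
    PySem.List.sorted (PySem.Set.ofList (edge_list.flatMap (fun e => [e.1, e.2.1])))
      (fun x => x) false
  nodes.map (fun u => nodes.map (fun v => weight.getD (u, v) 0))

-- ===== PRECONDITION & SPEC =====
def Spec_edge_to_adjacency (edge_list : List (Int × Int × Int)) (out : List (List Int)) : Prop := out = edge_to_adjacency_alt edge_list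
instance (edge_list : List (Int × Int × Int)) (out : List (List Int)) : Decidable (Spec_edge_to_adjacency edge_list out) := by unfold Spec_edge_to_adjacency; infer_instance

-- ===== CLAIM (what is proved, stated in full; the proofs are below) =====
def Claim_equal_edge_to_adjacency : Prop := ∀ (edge_list : List (Int × Int × Int)), Dom_edge_to_adjacency edge_list → Spec_edge_to_adjacency edge_list (edge_to_adjacency edge_list)

-- ===== LEMMAS AND PROOFS =====

-- A's per-edge set accumulation equals set() of the flattened endpoint list
lemma pvNodes_eq (el : List (Int × Int × Int)) :
    el.foldl (fun s e => PySem.Set.add (PySem.Set.add s e.1) e.2.1) PySem.Set.empty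
      = PySem.Set.ofList (el.flatMap (fun e => [e.1, e.2.1])) := by
  rw [PySem.Set.ofList_eq_foldl, List.foldl_flatMap]
  rfl

-- the enumerate-fold index dict: its items are the (node, position) pairs
lemma pvIdx_items (ns : List Int) (hnd : ns.Nodup) :
    ((PySem.List.enumerate ns 0).foldl (fun d p => d.insert p.2 p.1)
        (PySem.Dict.empty : PySem.Dict Int Int)).items
      = (PySem.List.enumerate ns 0).map (fun p => (p.2, p.1)) := by
  have h := PySem.Dict.items_foldl_insert_fresh (PySem.List.enumerate ns 0)
      (fun p => p.2) (fun p => p.1) (PySem.Dict.empty : PySem.Dict Int Int)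
      (by intro a _; simp [PySem.Dict.contains_empty])
      (by rw [PySem.List.map_snd_enumerate]; exact hnd)
  simpa using h

lemma pvIdx_keys (ns : List Int) (hnd : ns.Nodup) :
    ((PySem.List.enumerate ns 0).foldl (fun d p => d.insert p.2 p.1)
        (PySem.Dict.empty : PySem.Dict Int Int)).keys = ns := by
  show (((PySem.List.enumerate ns 0).foldl (fun d p => d.insert p.2 p.1)
      (PySem.Dict.empty : PySem.Dict Int Int)).items).map (fun p => p.1) = ns
  rw [pvIdx_items ns hnd, List.map_map]
  exact PySem.List.map_snd_enumerate ns 0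

-- looking up the k-th sorted node returns k
lemma pvIdx_getD (ns : List Int) (hnd : ns.Nodup) (k : Nat) (hk : k < ns.length) :
    ((PySem.List.enumerate ns 0).foldl (fun d p => d.insert p.2 p.1)
        (PySem.Dict.empty : PySem.Dict Int Int)).getD ns[k] 0 = (k : Int) := by
  apply PySem.Dict.getD_of_mem_items
  · rw [pvIdx_items ns hnd]
    refine List.mem_map.mpr ⟨((k : Int), ns[k]), ?_, rfl⟩
    exact (PySem.List.mem_enumerate_iff ns 0 _).mpr ⟨k, hk, by simp⟩
  · rw [pvIdx_keys ns hnd]; exact hnd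

-- the dict of the index-fold has size = number of nodes
lemma pvIdx_size (ns : List Int) (hnd : ns.Nodup) :
    ((PySem.List.enumerate ns 0).foldl (fun d p => d.insert p.2 p.1)
        (PySem.Dict.empty : PySem.Dict Int Int)).size = ns.length := by
  show (((PySem.List.enumerate ns 0).foldl (fun d p => d.insert p.2 p.1)
      (PySem.Dict.empty : PySem.Dict Int Int)).items).length = ns.length
  rw [pvIdx_items ns hnd]
  simp [PySem.List.length_enumerate]

-- one scatter step on the gathered matrix = gathering from the dict after one insert
lemma pvStep_eq (ns : List Int) (hnd : ns.Nodup) (idx : PySem.Dict Int Int)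
    (hidx : ∀ (k : Nat), (hk : k < ns.length) → idx.getD ns[k] 0 = (k : Int))
    (d : PySem.Dict (Int × Int) Int) (u v w : Int) (hu : u ∈ ns) (hv : v ∈ ns) :
    PySem.List.pySetD (ns.map (fun a => ns.map (fun b => d.getD (a, b) 0)))
        (idx.getD u 0)
        (PySem.List.pySetD
          (PySem.List.pyGetD (ns.map (fun a => ns.map (fun b => d.getD (a, b) 0)))
            (idx.getD u 0) [])
          (idx.getD v 0) w)
      = ns.map (fun a => ns.map (fun b => (d.insert (u, v) w).getD (a, b) 0)) := by
  obtain ⟨ku, hku, hu'⟩ := List.getElem_of_mem hu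
  obtain ⟨kv, hkv, hv'⟩ := List.getElem_of_mem hv
  subst hu' hv'
  rw [hidx ku hku, hidx kv hkv, PySem.List.pySetD_natCast, PySem.List.pySetD_natCast,
    PySem.List.pyGetD_natCast]
  rw [List.getD_eq_getElem _ _ (by simpa using hku), List.getElem_map]
  apply List.ext_getElem (by simp)
  intro p hp1 hp2
  rw [List.getElem_set, List.getElem_map]
  by_cases hpk : ku = p
  · rw [if_pos hpk]
    subst hpk
    apply List.ext_getElem (by simp)
    intro q hq1 hq2
    rw [List.getElem_set]
    simp only [List.getElem_map]
    rw [PySem.Dict.getD_insert]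
    by_cases hqv : kv = q
    · rw [if_pos hqv, if_pos (by cases hqv; rfl)]
    · rw [if_neg hqv, if_neg]
      intro hcontra
      exact hqv ((List.Nodup.getElem_inj_iff hnd).mp (congrArg Prod.snd hcontra).symm)
  · rw [if_neg hpk]
    apply List.ext_getElem (by simp)
    intro q hq1 hq2
    simp only [List.getElem_map]
    rw [PySem.Dict.getD_insert, if_neg]
    intro hcontra
    exact hpk ((List.Nodup.getElem_inj_iff hnd).mp (congrArg Prod.fst hcontra)).symm

-- the whole scatter fold = gather from the dict built by the insert fold
lemma pvFold_eq (ns : List Int) (hnd : ns.Nodup) (idx : PySem.Dict Int Int)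
    (hidx : ∀ (k : Nat), (hk : k < ns.length) → idx.getD ns[k] 0 = (k : Int)) :
    ∀ (l : List (Int × Int × Int)) (d : PySem.Dict (Int × Int) Int),
      (∀ e ∈ l, e.1 ∈ ns ∧ e.2.1 ∈ ns) →
      l.foldl (fun m e =>
          PySem.List.pySetD m (idx.getD e.1 0)
            (PySem.List.pySetD (PySem.List.pyGetD m (idx.getD e.1 0) [])
              (idx.getD e.2.1 0) e.2.2))
        (ns.map (fun a => ns.map (fun b => d.getD (a, b) 0)))
      = ns.map (fun a => ns.map (fun b =>
          (l.foldl (fun d e => d.insert (e.1, e.2.1) e.2.2) d).getD (a, b) 0)) := by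
  intro l
  induction l with
  | nil => intro d _; rfl
  | cons e t ih =>
    intro d hmem
    rw [List.foldl_cons, List.foldl_cons,
      pvStep_eq ns hnd idx hidx d e.1 e.2.1 e.2.2 (hmem e (by simp)).1 (hmem e (by simp)).2]
    exact ih (d.insert (e.1, e.2.1) e.2.2) (fun x hx => hmem x (List.mem_cons_of_mem e hx))

-- the preallocated zero matrix is the gather from the empty dict
lemma pvInit_eq (ns : List Int) :
    (PySem.List.pyRange 0 (ns.length : Int) 1).map
        (fun _ => PySem.List.pyRepeat [(0 : Int)] (ns.length : Int))
      = ns.map (fun a => ns.map (fun b =>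
          (PySem.Dict.empty : PySem.Dict (Int × Int) Int).getD (a, b) 0)) := by
  simp only [PySem.List.pyRepeat_singleton, PySem.Dict.getD_empty, Int.toNat_natCast]
  apply List.ext_getElem (by simp [PySem.List.length_pyRange_one])
  intro p hp1 hp2
  simp [List.getElem_replicate]

-- ===== VERDICT (by name: the statement is the Claim_ definition above) =====
theorem edge_to_adjacency_spec : Claim_equal_edge_to_adjacency := by
  intro el _
  unfold Spec_edge_to_adjacency
  simp only [edge_to_adjacency, edge_to_adjacency_alt]
  rw [pvNodes_eq el]
  set L := el.flatMap (fun e => [e.1, e.2.1]) with hL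
  set ns := PySem.List.sorted (PySem.Set.ofList L) (fun x => x) false with hns
  have hnd : ns.Nodup :=
    (PySem.List.sorted_ofList_pairwise_lt L).imp (fun h => ne_of_lt h)
  have hmemns : ∀ x, x ∈ ns ↔ x ∈ L := by
    intro x
    rw [hns, PySem.List.mem_sorted, PySem.Set.mem_ofList]
  rw [pvIdx_size ns hnd, pvInit_eq ns,
    pvFold_eq ns hnd _ (pvIdx_getD ns hnd) el PySem.Dict.empty]
  intro e he
  constructor
  · exact (hmemns e.1).mpr (List.mem_flatMap.mpr ⟨e, he, by simp⟩)
  · exact (hmemns e.2.1).mpr (List.mem_flatMap.mpr ⟨e, he, by simp⟩)
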